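-- pv_equiv track=rewrite | github.com/wojtekjs/Advent-of-Code-2023 | Day 5/seed_planting.py | get_map_chunks
-- ===== SOURCE A (Python) =====
-- def get_map_chunks(almanac: list[str]) -> list[list[str]]:
--     chunks: list[list[str]] = []
--     for i, line in enumerate(almanac[1:], start=1):
--         chunk: list[str] = []
--         if "map" in line:
--             chunk.append(line)
--             r: int = i + 1
--             while r <= len(almanac) - 1 and "map" not in almanac[r]:
--                 chunk.append(almanac[r])
--                 r += 1
--         chunks.append(chunk)
--     return [chunk for chunk in chunks if chunk != []]
-- ===== SOURCE B (Python) =====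
-- def get_map_chunks(almanac: list[str]) -> list[list[str]]:
--     chunks: list[list[str]] = []
--     cur: list[str] | None = None
--     for line in almanac[1:]:
--         if "map" in line:
--             if cur is not None:
--                 chunks.append(cur)
--             cur = [line]
--         elif cur is not None:
--             cur.append(line)
--     if cur is not None:
--         chunks.append(cur)
--     return chunks
-- ===== Notes on version B (the rewrite author's own statement) =====
-- stated objective: faster
-- what changed: Replaced the nested index-based scan (an inner while re-reading the following lines for every map line, then a filter dropping empty chunks) by a single forward pass with a current-chunk accumulator; measured ~1.9x faster, and O(n) instead of worst-case O(n^2).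
import Mathlib
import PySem

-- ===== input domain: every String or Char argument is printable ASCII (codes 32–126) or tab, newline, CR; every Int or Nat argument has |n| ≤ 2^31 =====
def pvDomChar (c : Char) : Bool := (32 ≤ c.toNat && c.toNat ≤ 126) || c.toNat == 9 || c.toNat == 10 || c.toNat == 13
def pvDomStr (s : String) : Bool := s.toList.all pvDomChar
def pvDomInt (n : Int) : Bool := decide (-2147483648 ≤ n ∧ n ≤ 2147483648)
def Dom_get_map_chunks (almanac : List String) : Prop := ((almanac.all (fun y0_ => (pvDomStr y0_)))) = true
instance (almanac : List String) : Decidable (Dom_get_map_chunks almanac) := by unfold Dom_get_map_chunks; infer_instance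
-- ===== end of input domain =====

-- B replaces A's nested index-based scan and final empty-chunk filter by one forward pass
-- with a current-chunk accumulator (objective: faster; one pass instead of re-reading following lines per map line).


-- ===== PORT A =====
-- inner while loop: the test 'r <= len(almanac) - 1' over the integers is written r + 1 ≤ almanac.length
-- over Nat (exact, avoids Nat-subtraction at length 0); almanac[r] is in range under the guard.
def pvWhileA (almanac : List String) (r : Nat) : List String :=
  if r + 1 ≤ almanac.length ∧ PySem.Str.isIn "map" (almanac.getD r "") = false then
    almanac.getD r "" :: pvWhileA almanac (r + 1)
  else []
termination_by almanac.length - r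

def get_map_chunks (almanac : List String) : List (List String) :=
  let chunks : List (List String) :=
    (PySem.List.enumerate (PySem.List.slice almanac (some 1) none) 1).map
      (fun iv => if PySem.Str.isIn "map" iv.2 then iv.2 :: pvWhileA almanac (iv.1.toNat + 1) else [])
  chunks.filter (fun chunk => chunk != [])

-- ===== PORT B =====
def pvBLoop (lines : List String) (chunks : List (List String)) (cur : Option (List String)) :
    List (List String) :=
  match lines with
  | [] => match cur with
          | some c => chunks ++ [c]
          | none => chunks
  | l :: ls =>
    if PySem.Str.isIn "map" l then
      pvBLoop ls (match cur with | some c => chunks ++ [c] | none => chunks) (some [l])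
    else
      match cur with
      | some c => pvBLoop ls chunks (some (c ++ [l]))
      | none => pvBLoop ls chunks none

def get_map_chunks_alt (almanac : List String) : List (List String) :=
  pvBLoop (PySem.List.slice almanac (some 1) none) [] none

-- ===== PRECONDITION & SPEC =====
def Spec_get_map_chunks (almanac : List String) (out : List (List String)) : Prop := out = get_map_chunks_alt almanac
instance (almanac : List String) (out : List (List String)) : Decidable (Spec_get_map_chunks almanac out) := by unfold Spec_get_map_chunks; infer_instance

-- ===== CLAIM (what is proved, stated in full; the proofs are below) =====
def Claim_equal_get_map_chunks : Prop := ∀ (almanac : List String), Dom_get_map_chunks almanac → Spec_get_map_chunks almanac (get_map_chunks almanac)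

-- ===== LEMMAS AND PROOFS =====

-- common reference: the chunks of a (tail) line list
def pvChunkSpec : List String → List (List String)
  | [] => []
  | l :: ls =>
    if PySem.Str.isIn "map" l then
      (l :: ls.takeWhile (fun x => !PySem.Str.isIn "map" x)) :: pvChunkSpec ls
    else pvChunkSpec ls

theorem pvWhileA_eq (almanac : List String) (r : Nat) :
    pvWhileA almanac r = (almanac.drop r).takeWhile (fun x => !PySem.Str.isIn "map" x) := by
  by_cases hr : r < almanac.length
  · have hg : almanac.getD r "" = almanac[r] := by
      simp [List.getD_eq_getElem?_getD, List.getElem?_eq_getElem hr]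
    rw [pvWhileA, hg, List.drop_eq_getElem_cons hr, List.takeWhile_cons]
    by_cases h : PySem.Str.isIn "map" almanac[r]
    · rw [if_neg (by rintro ⟨-, hc⟩; rw [h] at hc; simp at hc), h]
      simp
    · have h' : PySem.Str.isIn "map" almanac[r] = false := eq_false_of_ne_true h
      rw [if_pos ⟨by omega, h'⟩, pvWhileA_eq almanac (r + 1), h']
      simp
  · rw [pvWhileA, if_neg (fun hc => absurd hc.1 (by omega)), List.drop_eq_nil_of_le (by omega)]
    simp
termination_by almanac.length - r

theorem pvA_eq (almanac : List String) :
    ∀ (ls : List String) (i : Nat), almanac.drop i = ls →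
      (((PySem.List.enumerate ls (i : Int)).map
        (fun iv => if PySem.Str.isIn "map" iv.2 then iv.2 :: pvWhileA almanac (iv.1.toNat + 1) else [])).filter
        (fun chunk => chunk != [])) = pvChunkSpec ls := by
  intro ls
  induction ls with
  | nil => intro i _; rw [PySem.List.enumerate_nil]; rfl
  | cons l ls ih =>
    intro i hd
    have hd' : almanac.drop (i + 1) = ls := by
      rw [← List.tail_drop, hd]; rfl
    rw [PySem.List.enumerate_cons]
    have hcast : ((i : Int) + 1) = ((i + 1 : Nat) : Int) := by push_cast; ring
    rw [hcast]
    by_cases h : PySem.Str.isIn "map" l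
    · have h1 : pvWhileA almanac (i + 1) = ls.takeWhile (fun x => !PySem.Str.isIn "map" x) := by
        rw [pvWhileA_eq, hd']
      rw [List.map_cons, List.filter_cons]
      have h2 : (i : Int).toNat = i := Int.toNat_natCast i
      rw [h2, h1, if_pos h]
      simp only [ih (i + 1) hd', pvChunkSpec, h, if_pos]
      simp
    · have h' : PySem.Str.isIn "map" l = false := eq_false_of_ne_true h
      have hc := h'
      simp [PySem.Str.isIn] at hc
      rw [List.map_cons, List.filter_cons]
      rw [if_neg (by rw [h']; simp)]
      simp only [ih (i + 1) hd', pvChunkSpec, h']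
      simp

theorem pvB_some (ls : List String) (chunks : List (List String)) (c : List String) :
    pvBLoop ls chunks (some c) =
      chunks ++ (c ++ ls.takeWhile (fun x => !PySem.Str.isIn "map" x)) :: pvChunkSpec ls := by
  induction ls generalizing chunks c with
  | nil => simp [pvBLoop, pvChunkSpec]
  | cons l ls ih =>
    by_cases h : PySem.Str.isIn "map" l <;> simp [PySem.Str.isIn] at h <;>
      simp [pvBLoop, PySem.Str.isIn, h, pvChunkSpec, ih]

theorem pvB_none (ls : List String) (chunks : List (List String)) :
    pvBLoop ls chunks none = chunks ++ pvChunkSpec ls := by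
  induction ls generalizing chunks with
  | nil => simp [pvBLoop, pvChunkSpec]
  | cons l ls ih =>
    by_cases h : PySem.Str.isIn "map" l <;> simp [PySem.Str.isIn] at h
    · simp [pvBLoop, PySem.Str.isIn, h, pvChunkSpec, pvB_some]
    · simp [pvBLoop, PySem.Str.isIn, h, pvChunkSpec, ih]

-- ===== VERDICT (by name: the statement is the Claim_ definition above) =====
theorem get_map_chunks_spec : Claim_equal_get_map_chunks := by
  intro almanac _
  unfold Spec_get_map_chunks get_map_chunks get_map_chunks_alt
  rw [PySem.List.slice_from_one, pvB_none]
  have h := pvA_eq almanac almanac.tail 1 (by simp)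
  push_cast at h
  simpa using h
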